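-- pv_equiv track=rewrite | github.com/cotomonaga/syncsemphone-next | apps/api/scripts/reachability_lexicon_probe_20260302.py | _apply_replacements
-- ===== SOURCE A (Python) =====
-- def _apply_replacements(ids: list[int], repl: dict[int, int]) -> list[int]:
--     out = list(ids)
--     used_src: set[int] = set()
--     for idx, lid in enumerate(out):
--         if lid in repl and lid not in used_src:
--             out[idx] = repl[lid]
--             used_src.add(lid)
--     return out
-- ===== SOURCE B (Python) =====
-- def _apply_replacements(ids: list[int], repl: dict[int, int]) -> list[int]:
--     first_index: dict[int, int] = {}
--     for i, x in enumerate(ids):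
--         if x not in first_index:
--             first_index[x] = i
--     out = list(ids)
--     for src, tgt in repl.items():
--         if src in first_index:
--             out[first_index[src]] = tgt
--     return out
-- ===== Notes on version B (the rewrite author's own statement) =====
-- stated objective: alternative
-- what changed: Instead of one pass over ids tracking a used-source set, B precomputes a first-occurrence index table for ids and then iterates over the mapping, writing each target directly at the recorded first index of its source key.
import Mathlib
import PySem

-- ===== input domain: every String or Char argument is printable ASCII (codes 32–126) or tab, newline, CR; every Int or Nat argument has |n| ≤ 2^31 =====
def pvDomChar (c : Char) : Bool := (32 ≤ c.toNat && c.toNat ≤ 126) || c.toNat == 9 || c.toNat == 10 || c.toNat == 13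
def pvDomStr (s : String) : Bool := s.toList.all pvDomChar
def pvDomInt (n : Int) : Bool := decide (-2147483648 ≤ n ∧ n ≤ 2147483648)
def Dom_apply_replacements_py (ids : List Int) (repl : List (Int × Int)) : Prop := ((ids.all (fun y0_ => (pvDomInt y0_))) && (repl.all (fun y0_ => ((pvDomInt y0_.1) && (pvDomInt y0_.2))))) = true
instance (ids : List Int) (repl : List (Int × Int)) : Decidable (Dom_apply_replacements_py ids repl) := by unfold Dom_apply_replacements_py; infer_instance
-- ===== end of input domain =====

-- B replaces A's single pass over ids with a used-source set by a precomputed first-occurrence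
-- index table plus a pass over the mapping; same cost, different decomposition (objective: alternative).

-- ===== PORT A =====
-- the Python loop 'for idx, lid in enumerate(out): …' mutates out only at the current index, so it
-- is the structural recursion over (processed prefix, remaining suffix, used_src); lid = suffix head
def applyA_loop (d : PySem.Dict Int Int) :
    List Int → List Int → PySem.Set Int → List Int
  | done, [], _ => done
  | done, lid :: rest, used =>
    if d.contains lid && !(PySem.Set.contains used lid) then
      applyA_loop d (done ++ [(d.get? lid).getD 0]) rest (PySem.Set.add used lid)
    else
      applyA_loop d (done ++ [lid]) rest used

def apply_replacements_py (ids : List Int) (repl : List (Int × Int)) : List Int :=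
  applyA_loop (PySem.Dict.ofList repl) [] ids PySem.Set.empty


-- ===== PORT B =====
-- first_index = {}; for i, x in enumerate(ids): if x not in first_index: first_index[x] = i
def altFirstIndex (ids : List Int) : PySem.Dict Int Nat :=
  ids.zipIdx.foldl (fun d p => if d.contains p.1 then d else d.insert p.1 p.2) PySem.Dict.empty

-- out = list(ids); for src, tgt in repl.items(): if src in first_index: out[first_index[src]] = tgt
def apply_replacements_py_alt (ids : List Int) (repl : List (Int × Int)) : List Int :=
  let fi := altFirstIndex ids
  (PySem.Dict.ofList repl).items.foldl
    (fun out p =>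
      match fi.get? p.1 with
      | some i => out.set i p.2
      | none => out) ids


-- ===== PRECONDITION & SPEC =====
def Spec_apply_replacements_py (ids : List Int) (repl : List (Int × Int)) (out : List Int) : Prop := out = apply_replacements_py_alt ids repl
instance (ids : List Int) (repl : List (Int × Int)) (out : List Int) : Decidable (Spec_apply_replacements_py ids repl out) := by unfold Spec_apply_replacements_py; infer_instance

-- ===== CLAIM (what is proved, stated in full; the proofs are below) =====
def Claim_equal_apply_replacements_py : Prop := ∀ (ids : List Int) (repl : List (Int × Int)), Dom_apply_replacements_py ids repl → Spec_apply_replacements_py ids repl (apply_replacements_py ids repl)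

-- ===== LEMMAS AND PROOFS =====

-- pointwise description of A's loop: ids[j] is replaced iff it is a key and this is its first occurrence
def specGo (d : PySem.Dict Int Int) (seen : List Int) : List Int → List Int
  | [] => []
  | x :: r =>
    (if d.contains x && !(seen.contains x) then (d.get? x).getD 0 else x) :: specGo d (seen ++ [x]) r

theorem applyA_loop_eq (d : PySem.Dict Int Int) :
    ∀ (rest done : List Int) (used : PySem.Set Int) (seen : List Int),
    (∀ y, PySem.Set.contains used y = (d.contains y && seen.contains y)) →
    applyA_loop d done rest used = done ++ specGo d seen rest := by
  intro rest
  induction rest with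
  | nil => intro done used seen h; simp [applyA_loop, specGo]
  | cons x r ih =>
    intro done used seen h
    have hc : (d.contains x && !(PySem.Set.contains used x)) = (d.contains x && !(seen.contains x)) := by
      rw [h x]; cases d.contains x <;> simp
    have hcontadd : ∀ y, PySem.Set.contains (PySem.Set.add used x) y =
        (PySem.Set.contains used y || (y == x)) := by
      intro y
      by_cases hyx : y = x
      · subst hyx
        simp [PySem.Set.add, PySem.Set.contains]
        split_ifs with hm <;> simp [hm]
      · simp [PySem.Set.add, PySem.Set.contains]
        split_ifs with hm <;> simp [hyx]
    have happ : ∀ y, ((seen ++ [x]).contains y) = (seen.contains y || (y == x)) := by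
      intro y
      by_cases hyx : y = x <;> simp [hyx]
    by_cases hb : (d.contains x && !(seen.contains x)) = true
    · rw [applyA_loop, hc, hb, if_pos rfl]
      have hdx : d.contains x = true := by
        cases hx : d.contains x
        · rw [hx] at hb; simp at hb
        · rfl
      rw [ih _ _ (seen ++ [x]) ?_]
      · rw [specGo, hb, if_pos rfl]; simp
      · intro y
        rw [hcontadd y, h y, happ y]
        by_cases hyx : y = x
        · subst hyx; simp [hdx]
        · have hne : (y == x) = false := by simp [hyx]
          rw [hne]; cases d.contains y <;> simp
    · have hb' : (d.contains x && !(seen.contains x)) = false := by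
        cases hq : (d.contains x && !(seen.contains x))
        · rfl
        · exact absurd hq hb
      rw [applyA_loop, hc, hb', if_neg (by simp)]
      rw [ih _ _ (seen ++ [x]) ?_]
      · rw [specGo, hb', if_neg (by simp)]; simp
      · intro y
        rw [h y, happ y]
        by_cases hyx : y = x
        · subst hyx
          rcases Bool.and_eq_false_iff.mp hb' with hd | hs
          · simp [hd]
          · have : seen.contains y = true := by
              cases hq : seen.contains y
              · rw [hq] at hs; simp at hs
              · rfl
            have hmem : y ∈ seen := by simpa using this
            simp [hmem]
        · have hne : (y == x) = false := by simp [hyx]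
          rw [hne]; cases d.contains y <;> simp

theorem specGo_getElem? (d : PySem.Dict Int Int) :
    ∀ (l seen : List Int) (j : Nat),
    (specGo d seen l)[j]? = (l[j]?).map (fun x =>
      if d.contains x && !((seen ++ l.take j).contains x) then (d.get? x).getD 0 else x) := by
  intro l
  induction l with
  | nil => intro seen j; simp [specGo]
  | cons x r ih =>
    intro seen j
    cases j with
    | zero => simp [specGo]
    | succ j =>
      simp only [specGo, List.getElem?_cons_succ, List.take_succ_cons]
      rw [ih (seen ++ [x]) j]
      simp [List.append_assoc]

theorem altFirstIndex_aux :
    ∀ (l : List Int) (s : Nat) (d : PySem.Dict Int Nat) (x : Int),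
    ((l.zipIdx s).foldl (fun d p => if d.contains p.1 then d else d.insert p.1 p.2) d).get? x =
      if d.contains x then d.get? x else (PySem.List.index? l x).map (· + s) := by
  intro l
  induction l with
  | nil =>
    intro s d x
    cases hc : d.contains x
    · simp [PySem.List.index?, PySem.Dict.get?_eq_none_iff_contains, hc]
    · simp [hc]
  | cons a l ih =>
    intro s d x
    rw [List.zipIdx_cons, List.foldl_cons, ih]
    by_cases hax : x = a
    · subst hax
      rw [PySem.List.index?_cons_self]
      cases hc : d.contains x
      · simp [hc, PySem.Dict.contains_insert_self, PySem.Dict.get?_insert_self]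
      · simp [hc]
    · have h1 : PySem.List.index? (a :: l) x = (PySem.List.index? l x).map (· + 1) :=
        PySem.List.index?_cons_of_ne l (fun h => hax (Eq.symm h))
      rw [h1]
      have hmm : ((PySem.List.index? l x).map (· + (s+1))) = ((PySem.List.index? l x).map (· + 1)).map (· + s) := by
        cases PySem.List.index? l x <;> simp <;> omega
      cases hc : d.contains a
      · simp only [hc, Bool.false_eq_true, if_false]
        rw [PySem.Dict.contains_insert, PySem.Dict.get?_insert_of_ne _ _ hax]
        have : (x == a) = false := by simp [hax]
        rw [this, Bool.false_or]
        cases hcx : d.contains x <;> simp [hcx] <;> (cases List.idxOf? x l <;> simp [Function.comp] <;> omega)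
      · simp only [hc, if_true]
        cases hcx : d.contains x <;> simp [hcx] <;> (cases List.idxOf? x l <;> simp [Function.comp] <;> omega)

theorem altFirstIndex_get? (ids : List Int) (x : Int) :
    (altFirstIndex ids).get? x = PySem.List.index? ids x := by
  unfold altFirstIndex
  rw [altFirstIndex_aux ids 0 PySem.Dict.empty x]
  simp [PySem.Dict.contains_empty]

theorem index?_first_iff (ids : List Int) (x : Int) (j : Nat) :
    PySem.List.index? ids x = some j ↔
      ∃ h : j < ids.length, ids[j] = x ∧ x ∉ ids.take j := by
  constructor
  · intro h
    obtain ⟨hk, hx, hbef⟩ := PySem.List.getElem_of_index?_eq_some h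
    refine ⟨hk, hx, ?_⟩
    intro hm
    obtain ⟨k, hklt, hke⟩ := List.mem_take_iff_getElem.mp hm
    exact hbef k (by omega) hke
  · rintro ⟨h, hx, hnm⟩
    rw [PySem.List.index?_eq_some_iff]
    refine ⟨ids.take j, ids.drop (j+1), ?_, by simp [h.le], hnm⟩
    rw [← hx]
    conv_lhs => rw [← List.take_append_drop j ids]
    rw [List.getElem_cons_drop]

-- write-pass of B

theorem foldl_set_getElem? (ids : List Int) :
    ∀ (L : List (Int × Int)) (out : List Int), (L.map Prod.fst).Nodup → out.length = ids.length →
    ∀ j : Nat,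
    (L.foldl (fun out p =>
      match PySem.List.index? ids p.1 with
      | some i => out.set i p.2
      | none => out) out)[j]? =
      match L.find? (fun p => PySem.List.index? ids p.1 == some j) with
      | some p => some p.2
      | none => out[j]? := by
  intro L
  induction L with
  | nil => intro out _ _ j; simp
  | cons p L ih =>
    intro out hnd hlen j
    rw [List.map_cons, List.nodup_cons] at hnd
    obtain ⟨hp, hnd'⟩ := hnd
    rw [List.foldl_cons]
    cases hidx : PySem.List.index? ids p.1 with
    | none =>
      have hidx' : List.idxOf? p.1 ids = none := by simpa using hidx
      simp only [hidx]
      rw [ih out hnd' hlen j, List.find?_cons_of_neg (by simp [hidx'])]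
    | some i =>
      have hidx' : List.idxOf? p.1 ids = some i := by simpa using hidx
      simp only [hidx]
      have hlen' : (out.set i p.2).length = ids.length := by simp [hlen]
      by_cases hij : i = j
      · subst hij
        have hfnone : L.find? (fun q => PySem.List.index? ids q.1 == some i) = none := by
          rw [List.find?_eq_none]
          intro q hq
          simp only [beq_eq_false_iff_ne, ne_eq, beq_iff_eq]
          intro hqi
          obtain ⟨h1, h2, _⟩ := (index?_first_iff ids q.1 i).mp (by simpa using hqi)
          obtain ⟨h1', h2', _⟩ := (index?_first_iff ids p.1 i).mp (by simpa using hidx)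
          exact hp (by rw [← h2', h2]; exact List.mem_map_of_mem hq)
        rw [ih (out.set i p.2) hnd' hlen' i]
        rw [List.find?_cons_of_pos (by simp [hidx'])]
        rw [hfnone]
        have hi : i < out.length := by
          obtain ⟨h1, _, _⟩ := (index?_first_iff ids p.1 i).mp (by simpa using hidx)
          omega
        simp [List.getElem?_set_self, hi]
      · rw [ih (out.set i p.2) hnd' hlen' j]
        rw [List.find?_cons_of_neg (by simp [hidx', hij])]
        cases hf : L.find? (fun q => PySem.List.index? ids q.1 == some j) <;>
          simp [List.getElem?_set_ne, hij]

theorem apply_replacements_py_spec' (ids : List Int) (repl : List (Int × Int)) :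
    apply_replacements_py ids repl = apply_replacements_py_alt ids repl := by
  have hA : apply_replacements_py ids repl = specGo (PySem.Dict.ofList repl) [] ids := by
    unfold apply_replacements_py
    rw [applyA_loop_eq (PySem.Dict.ofList repl) ids [] PySem.Set.empty [] (by intro y; simp [PySem.Set.contains, PySem.Set.empty])]
    simp
  set d := PySem.Dict.ofList repl with hd
  have hkeys : d.keys.Nodup := PySem.Dict.nodup_keys_ofList repl
  have hkeys' : (d.items.map Prod.fst).Nodup := by simpa [PySem.Dict.keys] using hkeys
  have hB : apply_replacements_py_alt ids repl =
      d.items.foldl (fun out p =>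
        match PySem.List.index? ids p.1 with
        | some i => out.set i p.2
        | none => out) ids := by
    have hfg : (fun (out : List Int) (p : Int × Int) =>
        match (altFirstIndex ids).get? p.1 with
        | some i => out.set i p.2
        | none => out) = (fun (out : List Int) (p : Int × Int) =>
        match PySem.List.index? ids p.1 with
        | some i => out.set i p.2
        | none => out) := by
      funext out p
      rw [altFirstIndex_get?]
    show (PySem.Dict.ofList repl).items.foldl (fun out p =>
        match (altFirstIndex ids).get? p.1 with
        | some i => out.set i p.2
        | none => out) ids = _
    rw [hfg]
  rw [hA, hB]
  apply List.ext_getElem?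
  intro j
  rw [specGo_getElem?, foldl_set_getElem? ids d.items ids hkeys' rfl j]
  simp only [List.nil_append]
  by_cases hj : j < ids.length
  · have hget : ids[j]? = some ids[j] := List.getElem?_eq_getElem hj
    rw [hget]
    set x := ids[j] with hx
    by_cases hc : (d.contains x && !((ids.take j).contains x)) = true
    · have hdx : d.contains x = true := by
        cases hq : d.contains x
        · rw [hq] at hc; simp at hc
        · rfl
      have htk : x ∉ ids.take j := by
        cases hq : (ids.take j).contains x
        · simpa using hq
        · rw [hq] at hc; simp [hdx] at hc
      have hfi : PySem.List.index? ids x = some j := (index?_first_iff ids x j).mpr ⟨hj, rfl, htk⟩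
      have hsome : (d.get? x).isSome := by
        rw [← PySem.Dict.contains_eq_isSome_get?]; exact hdx
      obtain ⟨v, hv⟩ := Option.isSome_iff_exists.mp hsome
      have hmem : (x, v) ∈ d.items := PySem.Dict.mem_items_of_get?_eq_some _ hv
      have hfi' : List.idxOf? x ids = some j := by simpa using hfi
      have hfs : (d.items.find? (fun p => PySem.List.index? ids p.1 == some j)).isSome :=
        List.find?_isSome.mpr ⟨(x, v), hmem, by simp [hfi']⟩
      obtain ⟨q, hq⟩ := Option.isSome_iff_exists.mp hfs
      have hpred := List.find?_some hq
      have hqj : PySem.List.index? ids q.1 = some j := by simpa using hpred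
      have hq1 : q.1 = x := by
        obtain ⟨h1, h2, _⟩ := (index?_first_iff ids q.1 j).mp hqj
        rw [← h2]
      have hqmem : q ∈ d.items := List.mem_of_find?_eq_some hq
      have hq2 : d.get? q.1 = some q.2 := PySem.Dict.get?_of_mem_items _ hqmem hkeys
      rw [hq1, hv] at hq2
      rw [hq]
      simp [hdx, htk, hv]
      exact Option.some_inj.mp hq2
    · have hc' : (d.contains x && !((ids.take j).contains x)) = false := by
        cases hq : (d.contains x && !((ids.take j).contains x))
        · rfl
        · exact absurd hq hc
      have hfnone : d.items.find? (fun p => PySem.List.index? ids p.1 == some j) = none := by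
        rw [List.find?_eq_none]
        intro q hqmem
        simp only [beq_eq_false_iff_ne, ne_eq, PySem.List.index?_eq_idxOf?] at *
        intro hqj
        obtain ⟨h1, h2, h3⟩ := (index?_first_iff ids q.1 j).mp (by simpa using hqj)
        have hq2 : d.get? q.1 = some q.2 := PySem.Dict.get?_of_mem_items _ hqmem hkeys
        have hq1x : q.1 = x := by rw [← h2, hx]
        rw [hq1x] at hq2 h3
        have hdx : d.contains x = true := by
          rw [PySem.Dict.contains_eq_isSome_get?, hq2]; rfl
        have htk : (ids.take j).contains x = false := by simpa using h3
        rw [hdx, htk] at hc'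
        simp at hc'
      rw [hfnone]
      simp [hc']
      intro h1 h2
      rw [h1] at hc'
      simp at hc'
      exact absurd hc' h2
  · have hget : ids[j]? = none := List.getElem?_eq_none (by omega)
    rw [hget]
    cases hf : d.items.find? (fun p => PySem.List.index? ids p.1 == some j) with
    | none => simp
    | some q =>
      have hqj : PySem.List.index? ids q.1 = some j := by simpa using List.find?_some hf
      obtain ⟨h1, _, _⟩ := (index?_first_iff ids q.1 j).mp hqj
      omega

-- ===== VERDICT (by name: the statement is the Claim_ definition above) =====
theorem apply_replacements_py_spec : Claim_equal_apply_replacements_py := by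
  intro ids repl _
  unfold Spec_apply_replacements_py
  exact apply_replacements_py_spec' ids repl
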